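-- pv_equiv track=rewrite | github.com/jasonhemann/lolcode-lang | corpus/tier2/sallysanban-lolcode-interpreter/files/Project 3/EZR_B-4L/source code/syntax_analyzer.py | nextLineNumber
-- ===== SOURCE A (Python) =====
-- def nextLineNumber(lineNumber, lexemes, types):
--     found = False
--
--     for i in types.keys():
--         if(i == lineNumber):
--             found = True
--             continue
--
--         if(found):
--             return i
-- ===== SOURCE B (Python) =====
-- def nextLineNumber(lineNumber, lexemes, types):
--     ks = list(types.keys())
--     succ = dict(zip(ks, ks[1:]))
--     return succ.get(lineNumber)
-- ===== Notes on version B (the rewrite author's own statement) =====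
-- stated objective: alternative
-- what changed: Eliminates A's flag-driven search loop entirely: B builds a successor map dict(zip(keys, keys[1:])) once and answers with a single hash lookup succ.get(lineNumber).
import Mathlib
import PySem

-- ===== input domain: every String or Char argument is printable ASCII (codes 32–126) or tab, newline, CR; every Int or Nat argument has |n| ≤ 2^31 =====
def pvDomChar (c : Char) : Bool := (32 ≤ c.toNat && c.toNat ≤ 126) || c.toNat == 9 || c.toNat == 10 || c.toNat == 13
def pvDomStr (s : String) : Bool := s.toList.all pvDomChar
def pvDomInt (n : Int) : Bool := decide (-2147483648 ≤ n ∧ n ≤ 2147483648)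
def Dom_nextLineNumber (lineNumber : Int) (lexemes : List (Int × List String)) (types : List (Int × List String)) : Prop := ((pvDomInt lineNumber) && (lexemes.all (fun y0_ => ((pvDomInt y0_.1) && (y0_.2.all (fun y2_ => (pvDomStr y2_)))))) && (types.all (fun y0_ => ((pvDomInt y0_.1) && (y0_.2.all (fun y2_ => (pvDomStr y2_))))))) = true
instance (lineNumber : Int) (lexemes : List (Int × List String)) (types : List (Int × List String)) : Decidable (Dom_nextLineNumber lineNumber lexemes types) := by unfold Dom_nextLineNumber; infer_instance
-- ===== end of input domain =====

-- B removes A's flag-driven search loop: it builds a successor map dict(zip(keys, keys[1:]))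
-- once and answers with a single lookup; same linear cost, no scan-with-state.

-- ===== PORT A =====
-- the for-loop over types.keys() with the `found` flag
def nextLineNumberLoopA (lineNumber : Int) (keys : List Int) (found : Bool) : Option Int :=
  match keys with
  | [] => none
  | i :: rest =>
    if i == lineNumber then nextLineNumberLoopA lineNumber rest true
    else if found then some i
    else nextLineNumberLoopA lineNumber rest found

def nextLineNumber (lineNumber : Int) (lexemes : List (Int × List String)) (types : List (Int × List String)) : Option Int :=
  -- types.keys(): the dict's keys in first-occurrence order
  nextLineNumberLoopA lineNumber (PySem.List.dedup (types.map Prod.fst)) false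

-- ===== PORT B =====
-- ks = list(types.keys()); succ = dict(zip(ks, ks[1:])); return succ.get(lineNumber)
def nextLineNumber_alt (lineNumber : Int) (lexemes : List (Int × List String)) (types : List (Int × List String)) : Option Int :=
  let ks := PySem.List.dedup (types.map Prod.fst)
  let succ := PySem.Dict.ofList (ks.zip (ks.drop 1))
  succ.get? lineNumber

-- ===== PRECONDITION & SPEC =====
def Spec_nextLineNumber (lineNumber : Int) (lexemes : List (Int × List String)) (types : List (Int × List String)) (out : Option Int) : Prop := out = nextLineNumber_alt lineNumber lexemes types
instance (lineNumber : Int) (lexemes : List (Int × List String)) (types : List (Int × List String)) (out : Option Int) : Decidable (Spec_nextLineNumber lineNumber lexemes types out) := by unfold Spec_nextLineNumber; infer_instance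

-- ===== CLAIM (what is proved, stated in full; the proofs are below) =====
def Claim_equal_nextLineNumber : Prop := ∀ (lineNumber : Int) (lexemes : List (Int × List String)) (types : List (Int × List String)), Dom_nextLineNumber lineNumber lexemes types → Spec_nextLineNumber lineNumber lexemes types (nextLineNumber lineNumber lexemes types)

-- ===== LEMMAS AND PROOFS =====
-- first-match lookup in a raw pair list (proof-only helper)
def lookupPairs (x : Int) (ps : List (Int × Int)) : Option Int :=
  match ps with
  | [] => none
  | (a, b) :: rest => if a == x then some b else lookupPairs x rest

-- lookupPairs misses a key absent from the firsts
theorem lookupPairs_eq_none (x : Int) (ps : List (Int × Int)) (h : x ∉ ps.map Prod.fst) :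
    lookupPairs x ps = none := by
  induction ps with
  | nil => rfl
  | cons p rest ih =>
    obtain ⟨a, b⟩ := p
    simp only [List.map_cons, List.mem_cons, not_or] at h
    simp [lookupPairs, Ne.symm h.1, ih h.2]

-- dict built from pairs with distinct keys: get? is the first (only) match
theorem get?_update_pairs (x : Int) (ps : List (Int × Int))
    (h : (ps.map Prod.fst).Nodup) (d : PySem.Dict Int Int) :
    (d.update ps).get? x = (lookupPairs x ps).elim (d.get? x) some := by
  induction ps generalizing d with
  | nil => simp [PySem.Dict.update, lookupPairs]
  | cons p rest ih =>
    obtain ⟨a, b⟩ := p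
    simp only [List.map_cons, List.nodup_cons] at h
    have hstep : d.update ((a, b) :: rest) = (d.insert a b).update rest := by
      simp [PySem.Dict.update]
    rw [hstep, ih h.2]
    by_cases hx : a = x
    · subst hx
      simp [lookupPairs, lookupPairs_eq_none a rest h.1, PySem.Dict.get?_insert_self]
    · cases hrest : lookupPairs x rest with
      | none => simp [lookupPairs, hrest, hx, PySem.Dict.get?_insert_of_ne _ _ (Ne.symm hx)]
      | some v => simp [lookupPairs, hrest, hx]

theorem get?_ofList_pairs (x : Int) (ps : List (Int × Int)) (h : (ps.map Prod.fst).Nodup) :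
    (PySem.Dict.ofList ps).get? x = lookupPairs x ps := by
  rw [show PySem.Dict.ofList ps = PySem.Dict.empty.update ps from rfl,
    get?_update_pairs x ps h PySem.Dict.empty]
  cases lookupPairs x ps <;> simp [PySem.Dict.get?_empty]

-- the firsts of zip(ks, ks.drop 1) form a sublist of ks
theorem zip_fst_sublist (as bs : List Int) : List.Sublist ((as.zip bs).map Prod.fst) as := by
  induction as generalizing bs with
  | nil => simp
  | cons a as' ih =>
    cases bs with
    | nil => simp
    | cons b bs' => simpa using List.Sublist.cons₂ a (ih bs')

-- once found, A returns the next key; if lineNumber does not reoccur that is head?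
theorem loopA_found (lineNumber : Int) (keys : List Int) (h : lineNumber ∉ keys) :
    nextLineNumberLoopA lineNumber keys true = keys.head? := by
  cases keys with
  | nil => rfl
  | cons i rest =>
    simp only [List.mem_cons, not_or] at h
    simp [nextLineNumberLoopA, beq_iff_eq, Ne.symm h.1]

theorem loopA_eq_pairs (lineNumber : Int) (keys : List Int) (h : keys.Nodup) :
    nextLineNumberLoopA lineNumber keys false =
      lookupPairs lineNumber (keys.zip (keys.drop 1)) := by
  induction keys with
  | nil => rfl
  | cons i rest ih =>
    rw [List.nodup_cons] at h
    by_cases hi : i = lineNumber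
    · subst hi
      simp only [nextLineNumberLoopA, beq_self_eq_true, if_true]
      rw [loopA_found _ _ h.1]
      cases rest with
      | nil => rfl
      | cons j rest' => simp [lookupPairs]
    · cases rest with
      | nil => simp [nextLineNumberLoopA, lookupPairs, hi]
      | cons j rest' =>
        conv_lhs => rw [nextLineNumberLoopA]
        simp only [beq_iff_eq, hi, if_false, Bool.false_eq_true]
        rw [ih h.2]
        simp [lookupPairs, hi]

-- ===== VERDICT (by name: the statement is the Claim_ definition above) =====
theorem nextLineNumber_spec : Claim_equal_nextLineNumber := by
  intro lineNumber lexemes types _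
  unfold Spec_nextLineNumber nextLineNumber nextLineNumber_alt
  have hnd : (PySem.List.dedup (types.map Prod.fst)).Nodup := PySem.List.nodup_dedup _
  rw [get?_ofList_pairs _ _ ((zip_fst_sublist _ _).nodup hnd)]
  exact loopA_eq_pairs _ _ hnd
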